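-- pv_equiv track=rewrite | github.com/barbmariana/studies_library | University/Programming_Foundations/AD2_FP_MarianaBarbosa/questao2.py | calculate_corrects_numbers
-- ===== SOURCE A (Python) =====
-- def calculate_corrects_numbers(people, numbers):
--     d = dict()
--     for person in people:
--         counter = 0
--         for num in numbers:
--             if people[person].count(num):
--                 counter += 1
--
--         if d.get(counter) is None:
--             d[counter] = set()
--         d[counter].add(person)
--
--     return d
-- ===== SOURCE B (Python) =====
-- def calculate_corrects_numbers(people, numbers):
--     counts = {person: 0 for person in people}
--     index = {}
--     for person, values in people.items():
--         for v in values: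
--             index.setdefault(v, set()).add(person)
--     for num in numbers:
--         for person in index.get(num, ()):
--             counts[person] += 1
--     d = {}
--     for person, c in counts.items():
--         d.setdefault(c, set()).add(person)
--     return d
-- ===== Notes on version B (the rewrite author's own statement) =====
-- stated objective: faster
-- what changed: Builds an inverted index value->set-of-persons once and then sweeps numbers over that index to accumulate per-person counts, instead of rescanning every person's whole list for every number; grouping into the result dict becomes a separate final pass.
import Mathlib
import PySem

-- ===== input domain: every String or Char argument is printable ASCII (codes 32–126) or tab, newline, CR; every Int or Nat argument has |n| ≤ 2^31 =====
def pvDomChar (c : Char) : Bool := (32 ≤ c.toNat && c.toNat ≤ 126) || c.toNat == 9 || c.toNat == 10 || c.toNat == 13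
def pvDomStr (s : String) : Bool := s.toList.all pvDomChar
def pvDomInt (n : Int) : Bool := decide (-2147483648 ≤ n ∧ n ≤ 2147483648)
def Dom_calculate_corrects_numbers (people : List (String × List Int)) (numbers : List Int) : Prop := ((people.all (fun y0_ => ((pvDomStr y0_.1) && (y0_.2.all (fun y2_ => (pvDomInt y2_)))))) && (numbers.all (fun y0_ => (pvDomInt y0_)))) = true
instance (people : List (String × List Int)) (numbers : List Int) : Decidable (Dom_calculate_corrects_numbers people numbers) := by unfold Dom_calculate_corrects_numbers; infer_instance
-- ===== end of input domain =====

-- B replaces A's per-person rescan of numbers by an inverted index (value -> set of persons)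
-- swept once per number, with a separate final grouping pass; measurably faster on the generated timing inputs.

-- ===== PORT A =====
def calculate_corrects_numbers (people : List (String × List Int)) (numbers : List Int) : List (Int × List String) :=
  (people.foldl
    (fun d pv =>
      let counter : Int :=
        numbers.foldl
          (fun counter num =>
            if ((PySem.Dict.mk people).getD pv.1 []).count num ≠ 0 then counter + 1 else counter)
          0
      let d := if (d.get? counter).isNone then d.insert counter PySem.Set.empty else d
      d.modify counter PySem.Set.empty (fun s => PySem.Set.add s pv.1))
    PySem.Dict.empty).items

-- ===== PORT B =====
def calculate_corrects_numbers_alt (people : List (String × List Int)) (numbers : List Int) : List (Int × List String) :=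
  let counts : PySem.Dict String Int :=
    people.foldl (fun counts pv => counts.insert pv.1 0) PySem.Dict.empty
  let index : PySem.Dict Int (PySem.Set String) :=
    people.foldl
      (fun index pv =>
        pv.2.foldl
          (fun index v =>
            (index.setdefault v PySem.Set.empty).modify v PySem.Set.empty
              (fun s => PySem.Set.add s pv.1))
          index)
      PySem.Dict.empty
  let counts := numbers.foldl
      (fun counts num =>
        (index.getD num PySem.Set.empty).foldl
          (fun counts person => counts.modify person 0 (· + 1)) counts)
      counts
  let d : PySem.Dict Int (PySem.Set String) :=
    counts.items.foldl
      (fun d pc =>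
        (d.setdefault pc.2 PySem.Set.empty).modify pc.2 PySem.Set.empty
          (fun s => PySem.Set.add s pc.1))
      PySem.Dict.empty
  d.items

-- ===== PRECONDITION & SPEC =====
-- Pre_ excludes association lists with duplicate keys: those do not represent any Python dict
-- (dict construction merges them), so the list model's first-match reading of them is accidental.
def Pre_calculate_corrects_numbers (people : List (String × List Int)) (numbers : List Int) : Prop :=
  (people.map Prod.fst).Nodup
instance (people : List (String × List Int)) (numbers : List Int) : Decidable (Pre_calculate_corrects_numbers people numbers) := by unfold Pre_calculate_corrects_numbers; infer_instance
def pvWitness_calculate_corrects_numbers : (List (String × List Int)) × List Int :=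
  ([("ana", [1, 2, 2]), ("bo", [2]), ("cy", [])], [2, 3, 2])
def Spec_calculate_corrects_numbers (people : List (String × List Int)) (numbers : List Int) (out : List (Int × List String)) : Prop := out = calculate_corrects_numbers_alt people numbers
instance (people : List (String × List Int)) (numbers : List Int) (out : List (Int × List String)) : Decidable (Spec_calculate_corrects_numbers people numbers out) := by unfold Spec_calculate_corrects_numbers; infer_instance

-- ===== CLAIM (what is proved, stated in full; the proofs are below) =====
def Claim_equal_calculate_corrects_numbers : Prop := ∀ (people : List (String × List Int)) (numbers : List Int), Dom_calculate_corrects_numbers people numbers → Pre_calculate_corrects_numbers people numbers → Spec_calculate_corrects_numbers people numbers (calculate_corrects_numbers people numbers)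

-- ===== LEMMAS AND PROOFS =====

-- the grouping step both programs end with: put p into the set stored under key c
def pvGroup (d : PySem.Dict Int (PySem.Set String)) (c : Int) (p : String) : PySem.Dict Int (PySem.Set String) :=
  (d.setdefault c PySem.Set.empty).modify c PySem.Set.empty (fun s => PySem.Set.add s p)

-- A's "if d.get(c) is None: d[c]=set()" followed by "d[c].add(p)" is exactly pvGroup
lemma groupA_eq_pvGroup (d : PySem.Dict Int (PySem.Set String)) (c : Int) (p : String) :
    (if (d.get? c).isNone then d.insert c PySem.Set.empty else d).modify c PySem.Set.empty
      (fun s => PySem.Set.add s p) = pvGroup d c p := by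
  unfold pvGroup
  congr 1
  by_cases h : d.contains c
  · rw [PySem.Dict.setdefault_of_contains d _ h]
    have hne : d.get? c ≠ none := by
      intro hn; rw [PySem.Dict.get?_eq_none_iff_contains] at hn; simp [h] at hn
    simp [Option.isNone_iff_eq_none, hne]
  · have hf : d.contains c = false := by simpa using h
    rw [PySem.Dict.setdefault_of_not_contains d _ hf]
    have hn : d.get? c = none := (PySem.Dict.get?_eq_none_iff_contains d c).mpr hf
    simp [hn]

-- first-match lookup of a key of a duplicate-free association list returns its pair's value
lemma lookup_eq {people : List (String × List Int)} (h : (people.map Prod.fst).Nodup)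
    {pv : String × List Int} (hm : pv ∈ people) : (PySem.Dict.mk people).getD pv.1 [] = pv.2 := by
  have hi : (PySem.Dict.mk people).get? pv.1 = some pv.2 := by
    apply PySem.Dict.get?_of_mem_items
    · simpa [PySem.Dict.items] using hm
    · simpa [PySem.Dict.keys, PySem.Dict.items] using h
  simp [PySem.Dict.getD, hi]

-- two members of a duplicate-free association list with the same key are equal
lemma fst_inj {people : List (String × List Int)} (h : (people.map Prod.fst).Nodup)
    {pv qv : String × List Int} (hp : pv ∈ people) (hq : qv ∈ people) (heq : pv.1 = qv.1) :
    pv = qv := List.inj_on_of_nodup_map h hp hq heq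

-- A's inner counter loop counts the numbers that occur in vs
lemma cnt_eq (vs : List Int) (numbers : List Int) :
    numbers.foldl (fun c num => if vs.count num ≠ 0 then c + 1 else c) 0
      = (numbers.countP (fun num => decide (num ∈ vs)) : Int) := by
  have hc : ∀ num : Int, (vs.count num ≠ 0) ↔ num ∈ vs := by
    intro num; rw [← List.count_pos_iff]; omega
  have hfc := PySem.List.foldl_count_if (fun num => decide (num ∈ vs)) numbers 0
  simp only [decide_eq_true_eq] at hfc
  simp only [hc]
  simpa using hfc

-- effect of one person's inner index loop on one bucket
lemma bucket_person (p : String) (vs : List Int) (ix : PySem.Dict Int (PySem.Set String)) (num : Int) :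
    (vs.foldl (fun ix v =>
        (ix.setdefault v PySem.Set.empty).modify v PySem.Set.empty (fun s => PySem.Set.add s p)) ix).getD num PySem.Set.empty
      = if num ∈ vs then PySem.Set.add (ix.getD num PySem.Set.empty) p
        else ix.getD num PySem.Set.empty := by
  induction vs generalizing ix with
  | nil => simp
  | cons v vs ih =>
    simp only [List.foldl_cons, ih]
    have hstep : ((ix.setdefault v PySem.Set.empty).modify v PySem.Set.empty
        (fun s => PySem.Set.add s p)).getD num PySem.Set.empty
        = if num = v then PySem.Set.add (ix.getD num PySem.Set.empty) p
          else ix.getD num PySem.Set.empty := by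
      rw [PySem.Dict.getD_modify]
      by_cases hnv : num = v
      · subst hnv
        simp [PySem.Dict.getD_setdefault_self]
      · simp only [if_neg hnv]
        rw [PySem.Dict.getD]
        rw [PySem.Dict.get?_setdefault_of_ne _ _ hnv]
        rfl
    rw [hstep]
    by_cases hnv : num = v
    · subst hnv
      by_cases hmem : num ∈ vs
      · simp [hmem, PySem.Set.add_of_mem, PySem.Set.mem_add]
      · simp [hmem]
    · by_cases hmem : num ∈ vs <;> simp [hnv, hmem]

-- the finished index: bucket num holds exactly the keys whose value list contains num, in order
lemma index_getD (people : List (String × List Int)) (num : Int) :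
    (people.foldl
        (fun index pv =>
          pv.2.foldl
            (fun index v =>
              (index.setdefault v PySem.Set.empty).modify v PySem.Set.empty
                (fun s => PySem.Set.add s pv.1)) index)
        PySem.Dict.empty).getD num PySem.Set.empty
      = PySem.Set.ofList ((people.filter (fun pv => decide (num ∈ pv.2))).map Prod.fst) := by
  rw [PySem.Set.ofList_eq_foldl]
  have main : ∀ ix : PySem.Dict Int (PySem.Set String),
      (people.foldl
        (fun index pv =>
          pv.2.foldl
            (fun index v =>
              (index.setdefault v PySem.Set.empty).modify v PySem.Set.empty
                (fun s => PySem.Set.add s pv.1)) index) ix).getD num PySem.Set.empty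
      = ((people.filter (fun pv => decide (num ∈ pv.2))).map Prod.fst).foldl PySem.Set.add
          (ix.getD num PySem.Set.empty) := by
    induction people with
    | nil => intro ix; simp
    | cons pv rest ih =>
      intro ix
      rw [List.foldl_cons, ih, bucket_person]
      by_cases hmem : num ∈ pv.2
      · rw [if_pos hmem]; simp [hmem]
      · rw [if_neg hmem]; simp [hmem]
  rw [main PySem.Dict.empty, PySem.Dict.getD_empty]
  rfl

-- folding "+= 1" over a duplicate-free list of keys adds 1 exactly to its members
lemma counts_bucket (l : List String) (hnd : l.Nodup) (cs : PySem.Dict String Int) (p : String) :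
    (l.foldl (fun cs q => cs.modify q 0 (· + 1)) cs).getD p 0
      = cs.getD p 0 + (if p ∈ l then 1 else 0) := by
  induction l generalizing cs with
  | nil => simp
  | cons q l ih =>
    simp only [List.foldl_cons]
    rw [ih (List.Nodup.of_cons hnd)]
    rw [PySem.Dict.getD_modify]
    by_cases hpq : p = q
    · subst hpq
      have : p ∉ l := by simp_all
      simp [this]
    · simp [hpq, List.mem_cons]

-- the numbers pass: each number adds 1 to every person in its bucket
lemma counts_pass (numbers : List Int) (bucket : Int → PySem.Set String)
    (hnd : ∀ num, (bucket num).Nodup) (p : String) : ∀ cs : PySem.Dict String Int,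
    (numbers.foldl (fun cs num => (bucket num).foldl (fun cs person => cs.modify person 0 (· + 1)) cs) cs).getD p 0
      = cs.getD p 0 + (numbers.countP (fun num => decide (p ∈ bucket num)) : Int) := by
  induction numbers with
  | nil => intro cs; simp
  | cons num numbers ih =>
    intro cs
    rw [List.foldl_cons, ih, counts_bucket _ (hnd num)]
    rw [List.countP_cons]
    by_cases hmem : p ∈ bucket num
    · simp [hmem]; ring
    · simp [hmem]

-- the numbers pass never changes the key list, as long as it only touches existing keys
lemma keys_counts_pass (numbers : List Int) (bucket : Int → PySem.Set String) :
    ∀ cs : PySem.Dict String Int, (∀ num, ∀ q ∈ bucket num, q ∈ cs.keys) →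
    (numbers.foldl (fun cs num => (bucket num).foldl (fun cs person => cs.modify person 0 (· + 1)) cs) cs).keys
      = cs.keys := by
  have inner : ∀ (l : List String) (cs : PySem.Dict String Int), (∀ q ∈ l, q ∈ cs.keys) →
      (l.foldl (fun cs person => cs.modify person 0 (· + 1)) cs).keys = cs.keys := by
    intro l
    induction l with
    | nil => intro cs _; simp
    | cons q l ihl =>
      intro cs hq
      rw [List.foldl_cons]
      have hc : cs.contains q = true := by
        rw [PySem.Dict.contains_iff_mem_keys]; exact hq q (by simp)
      have hk : (cs.modify q 0 (· + 1)).keys = cs.keys := by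
        rw [PySem.Dict.keys_modify, PySem.Dict.keys_insert_of_contains _ _ hc]
      rw [ihl _ (by intro x hx; rw [hk]; exact hq x (by simp [hx]))]
      exact hk
  induction numbers with
  | nil => intro cs _; rfl
  | cons num numbers ihn =>
    intro cs h
    rw [List.foldl_cons]
    have hk := inner (bucket num) cs (h num)
    rw [ihn _ (by intro m q hq; rw [hk]; exact h m q hq)]
    exact hk

-- proof-local names for B's three intermediate dictionaries (definitionally the ones in the port)
def pvCounts0 (people : List (String × List Int)) : PySem.Dict String Int :=
  people.foldl (fun counts pv => counts.insert pv.1 0) PySem.Dict.empty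

def pvIndex (people : List (String × List Int)) : PySem.Dict Int (PySem.Set String) :=
  people.foldl
    (fun index pv =>
      pv.2.foldl
        (fun index v =>
          (index.setdefault v PySem.Set.empty).modify v PySem.Set.empty
            (fun s => PySem.Set.add s pv.1)) index)
    PySem.Dict.empty

def pvCounts2 (people : List (String × List Int)) (numbers : List Int) : PySem.Dict String Int :=
  numbers.foldl
    (fun counts num =>
      ((pvIndex people).getD num PySem.Set.empty).foldl
        (fun counts person => counts.modify person 0 (· + 1)) counts)
    (pvCounts0 people)

lemma alt_eq (people : List (String × List Int)) (numbers : List Int) :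
    calculate_corrects_numbers_alt people numbers
      = ((pvCounts2 people numbers).items.foldl (fun d pc => pvGroup d pc.2 pc.1) PySem.Dict.empty).items := rfl

-- the per-person score both programs assign
def pvCnt (numbers : List Int) (pv : String × List Int) : Int :=
  (numbers.countP (fun num => decide (num ∈ pv.2)) : Int)

lemma items_counts0 (people : List (String × List Int)) (h : (people.map Prod.fst).Nodup) :
    (pvCounts0 people).items = people.map (fun pv => (pv.1, (0 : Int))) := by
  unfold pvCounts0
  have := PySem.Dict.items_foldl_insert_fresh people Prod.fst (fun _ => (0 : Int)) PySem.Dict.empty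
      (by intro a _; simp) h
  simpa using this

lemma keys_counts0 (people : List (String × List Int)) (h : (people.map Prod.fst).Nodup) :
    (pvCounts0 people).keys = people.map Prod.fst := by
  simp only [PySem.Dict.keys, items_counts0 people h, List.map_map]
  rfl

lemma index_bucket (people : List (String × List Int)) (num : Int) :
    (pvIndex people).getD num PySem.Set.empty
      = PySem.Set.ofList ((people.filter (fun pv => decide (num ∈ pv.2))).map Prod.fst) := by
  unfold pvIndex
  exact index_getD people num

lemma mem_bucket_iff (people : List (String × List Int)) (h : (people.map Prod.fst).Nodup)
    {pv : String × List Int} (hpv : pv ∈ people) (num : Int) :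
    pv.1 ∈ (pvIndex people).getD num PySem.Set.empty ↔ num ∈ pv.2 := by
  rw [index_bucket, PySem.Set.mem_ofList]
  constructor
  · intro hm
    obtain ⟨qv, hq, hq1⟩ := List.mem_map.mp hm
    have hqm : qv ∈ people := List.mem_of_mem_filter hq
    have : qv = pv := fst_inj h hqm hpv hq1
    subst this
    simpa using List.of_mem_filter hq
  · intro hm
    exact List.mem_map.mpr ⟨pv, List.mem_filter.mpr ⟨hpv, by simpa using hm⟩, rfl⟩

lemma keys_counts2 (people : List (String × List Int)) (numbers : List Int)
    (h : (people.map Prod.fst).Nodup) :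
    (pvCounts2 people numbers).keys = people.map Prod.fst := by
  unfold pvCounts2
  rw [keys_counts_pass numbers (fun num => (pvIndex people).getD num PySem.Set.empty) (pvCounts0 people)]
  · exact keys_counts0 people h
  · intro num q hq
    rw [index_bucket, PySem.Set.mem_ofList] at hq
    obtain ⟨qv, hqf, hq1⟩ := List.mem_map.mp hq
    rw [keys_counts0 people h]
    exact hq1 ▸ List.mem_map_of_mem (List.mem_of_mem_filter hqf)

lemma getD_counts0 (people : List (String × List Int)) (h : (people.map Prod.fst).Nodup)
    {pv : String × List Int} (hpv : pv ∈ people) : (pvCounts0 people).getD pv.1 0 = 0 := by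
  have hi : (pvCounts0 people).get? pv.1 = some 0 := by
    apply PySem.Dict.get?_of_mem_items
    · rw [items_counts0 people h]
      exact List.mem_map_of_mem hpv
    · rw [keys_counts0 people h]; exact h
  simp [PySem.Dict.getD, hi]

lemma getD_counts2 (people : List (String × List Int)) (numbers : List Int)
    (h : (people.map Prod.fst).Nodup) {pv : String × List Int} (hpv : pv ∈ people) :
    (pvCounts2 people numbers).getD pv.1 0 = pvCnt numbers pv := by
  unfold pvCounts2
  rw [counts_pass numbers (fun num => (pvIndex people).getD num PySem.Set.empty)
      (by intro num
          show ((pvIndex people).getD num PySem.Set.empty).Nodup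
          rw [index_bucket]; exact PySem.Set.nodup_ofList _) pv.1 (pvCounts0 people)]
  rw [getD_counts0 people h hpv]
  unfold pvCnt
  rw [List.countP_congr]
  · ring
  · intro num _
    simp only [decide_eq_true_eq]
    exact mem_bucket_iff people h hpv num

lemma items_counts2 (people : List (String × List Int)) (numbers : List Int)
    (h : (people.map Prod.fst).Nodup) :
    (pvCounts2 people numbers).items = people.map (fun pv => (pv.1, pvCnt numbers pv)) := by
  rw [PySem.Dict.items_eq_map_keys (pvCounts2 people numbers)
      (by rw [keys_counts2 people numbers h]; exact h) 0]
  rw [keys_counts2 people numbers h, List.map_map]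
  apply List.map_congr_left
  intro pv hpv
  simp only [Function.comp_apply]
  rw [getD_counts2 people numbers h hpv]

-- ===== VERDICT (by name: the statement is the Claim_ definition above) =====
theorem calculate_corrects_numbers_spec : Claim_equal_calculate_corrects_numbers := by
  intro people numbers _ hpre
  unfold Spec_calculate_corrects_numbers
  rw [alt_eq, items_counts2 people numbers hpre, List.foldl_map]
  unfold calculate_corrects_numbers
  congr 1
  apply PySem.List.foldl_congr_mem
  intro d pv hpv
  simp only [lookup_eq hpre hpv, cnt_eq]
  exact groupA_eq_pvGroup d (pvCnt numbers pv) pv.1
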